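-- pv_equiv track=rewrite | github.com/seokjaehong/birdview | test.py | calculate_hobby_count_with_comparison
-- ===== SOURCE A (Python) =====
-- def calculate_hobby_count_with_comparison(comblist):
--     """
--     2개의 array(comblist)를 비교해서 같은 알파벳의 개수를 COUNT.
--     :param comblist:
--     :return:
--     """
--     count = 0
--     first_list = list(comblist.values())[0]
--     second_list = list(comblist.values())[1]
--     for x in first_list:
--         for y in second_list:
--             if x == y:
--                 count += 1
--     return count
-- ===== SOURCE B (Python) =====
-- def calculate_hobby_count_with_comparison(comblist):
--     vals = list(comblist.values())
--     first_list = vals[0]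
--     second_list = vals[1]
--     cnt = {}
--     for y in second_list:
--         cnt[y] = cnt.get(y, 0) + 1
--     total = 0
--     for x in first_list:
--         total += cnt.get(x, 0)
--     return total
-- ===== Notes on version B (the rewrite author's own statement) =====
-- stated objective: alternative
-- what changed: Replaces the nested pair scan with a single frequency dict built over the second list and one summing lookup pass over the first list.
import Mathlib
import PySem

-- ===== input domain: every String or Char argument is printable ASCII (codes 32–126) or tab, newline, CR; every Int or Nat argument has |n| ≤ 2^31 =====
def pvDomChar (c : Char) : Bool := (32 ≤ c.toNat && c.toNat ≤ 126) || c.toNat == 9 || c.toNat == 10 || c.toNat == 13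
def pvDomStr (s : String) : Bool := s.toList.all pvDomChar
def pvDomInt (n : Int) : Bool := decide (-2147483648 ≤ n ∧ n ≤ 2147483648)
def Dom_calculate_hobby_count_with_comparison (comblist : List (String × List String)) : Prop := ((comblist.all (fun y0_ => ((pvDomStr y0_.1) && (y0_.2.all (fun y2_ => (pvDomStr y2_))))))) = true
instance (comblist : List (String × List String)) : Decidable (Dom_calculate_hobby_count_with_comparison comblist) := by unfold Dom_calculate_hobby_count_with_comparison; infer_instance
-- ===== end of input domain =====

-- ===== PORT A =====
-- A: nested loops over the first two value lists of the dict, counting equal pairs.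
def calculate_hobby_count_with_comparison (comblist : List (String × List String)) : Int :=
  let vals := (PySem.Dict.ofList comblist).values
  let first_list := PySem.List.pyGetD vals 0 []
  let second_list := PySem.List.pyGetD vals 1 []
  first_list.foldl (fun count x =>
    second_list.foldl (fun count y => if x == y then count + 1 else count) count) 0

-- ===== PORT B =====
-- B (alternative decomposition): build a frequency dict of the second list, then sum lookups over the first.
def calculate_hobby_count_with_comparison_alt (comblist : List (String × List String)) : Int :=
  let vals := (PySem.Dict.ofList comblist).values
  let first_list := PySem.List.pyGetD vals 0 []
  let second_list := PySem.List.pyGetD vals 1 []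
  let cnt := second_list.foldl (fun d y => d.insert y (d.getD y 0 + 1)) PySem.Dict.empty
  first_list.foldl (fun total x => total + cnt.getD x 0) 0

-- ===== PRECONDITION & SPEC =====
-- Pre_ excludes dicts with fewer than two keys, on which A raises IndexError.
def Pre_calculate_hobby_count_with_comparison (comblist : List (String × List String)) : Prop :=
  2 ≤ ((PySem.Dict.ofList comblist).values).length
instance (comblist : List (String × List String)) : Decidable (Pre_calculate_hobby_count_with_comparison comblist) := by
  unfold Pre_calculate_hobby_count_with_comparison; infer_instance
def pvWitness_calculate_hobby_count_with_comparison : (List (String × List String)) :=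
  [("a", ["x", "y"]), ("b", ["x", "x", "z"])]

def Spec_calculate_hobby_count_with_comparison (comblist : List (String × List String)) (out : Int) : Prop := out = calculate_hobby_count_with_comparison_alt comblist
instance (comblist : List (String × List String)) (out : Int) : Decidable (Spec_calculate_hobby_count_with_comparison comblist out) := by unfold Spec_calculate_hobby_count_with_comparison; infer_instance

-- ===== CLAIM (what is proved, stated in full; the proofs are below) =====
def Claim_equal_calculate_hobby_count_with_comparison : Prop := ∀ (comblist : List (String × List String)), Dom_calculate_hobby_count_with_comparison comblist → Pre_calculate_hobby_count_with_comparison comblist → Spec_calculate_hobby_count_with_comparison comblist (calculate_hobby_count_with_comparison comblist)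

-- ===== LEMMAS AND PROOFS =====

-- ===== VERDICT (by name: the statement is the Claim_ definition above) =====
-- inner loop of A counts occurrences of x in l
lemma inner_count (x : String) (l : List String) (c : Int) :
    l.foldl (fun count y => if x == y then count + 1 else count) c = c + l.count x := by
  induction l generalizing c with
  | nil => simp
  | cons h t ih =>
    simp only [List.foldl_cons, List.count_cons, ih]
    by_cases hx : h = x
    · subst hx; simp; ring
    · have hb : (x == h) = false := by simp; exact fun e => hx e.symm
      simp [hb, hx]

lemma both_eq (first second : List String) :
    first.foldl (fun count x =>
      second.foldl (fun count y => if x == y then count + 1 else count) count) (0 : Int) =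
    first.foldl (fun total x =>
      total + (second.foldl (fun d y => d.insert y (d.getD y 0 + 1)) PySem.Dict.empty).getD x 0) (0 : Int) := by
  apply PySem.List.foldl_congr_mem
  intro c x _
  rw [inner_count x second c, PySem.Dict.foldl_insert_getD_add_one_eq_counter,
    PySem.Dict.getD_counter]

theorem calculate_hobby_count_with_comparison_spec : Claim_equal_calculate_hobby_count_with_comparison := by
  intro comblist _ _
  unfold Spec_calculate_hobby_count_with_comparison
  unfold calculate_hobby_count_with_comparison calculate_hobby_count_with_comparison_alt
  exact both_eq (PySem.List.pyGetD ((PySem.Dict.ofList comblist).values) 0 [])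
    (PySem.List.pyGetD ((PySem.Dict.ofList comblist).values) 1 [])
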